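-- pv_equiv track=rewrite | github.com/H0r4c3/Challenges | py.checkio.org/follow_instructions.py | follow_H
-- ===== SOURCE A (Python) =====
-- from typing import Tuple
--
-- def follow_H(instructions: str) -> Tuple[int, int]:
--     coordinates = [0, 0]
--
--     for item in instructions:
--         if item == 'f':
--             coordinates[1] += 1
--             continue
--         if item == 'b':
--             coordinates[1] -= 1
--             continue
--         if item == 'r':
--             coordinates[0] += 1
--             continue
--         if item == 'l':
--             coordinates[0] -= 1
--
--     return tuple(coordinates)
-- ===== SOURCE B (Python) =====
-- def follow_H(instructions: str):
--     return (instructions.count('r') - instructions.count('l'),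
--             instructions.count('f') - instructions.count('b'))
-- ===== Notes on version B (the rewrite author's own statement) =====
-- stated objective: simpler
-- what changed: Replaces the branching per-character accumulation loop with a loop-free closed form: each coordinate is a difference of two str.count calls.
import Mathlib
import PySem

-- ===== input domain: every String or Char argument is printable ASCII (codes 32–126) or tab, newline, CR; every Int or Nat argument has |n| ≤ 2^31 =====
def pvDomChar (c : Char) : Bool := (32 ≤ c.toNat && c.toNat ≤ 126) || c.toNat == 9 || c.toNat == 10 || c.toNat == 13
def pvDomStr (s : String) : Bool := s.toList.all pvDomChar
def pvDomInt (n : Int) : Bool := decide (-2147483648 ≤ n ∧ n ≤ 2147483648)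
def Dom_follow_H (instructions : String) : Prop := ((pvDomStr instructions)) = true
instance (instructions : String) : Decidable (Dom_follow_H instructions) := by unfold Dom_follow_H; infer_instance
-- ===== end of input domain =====

-- B replaces A's branching accumulation loop with a loop-free closed form from substring counts (objective: simpler).


-- ===== PORT A =====
-- literal transliteration: coordinates = [0,0] becomes a pair state folded over the string's characters,
-- with the four branches in A's order (f, b, r, l).
def follow_H (instructions : String) : Int × Int :=
  instructions.toList.foldl
    (fun coordinates item =>
      if item = 'f' then (coordinates.1, coordinates.2 + 1)
      else if item = 'b' then (coordinates.1, coordinates.2 - 1)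
      else if item = 'r' then (coordinates.1 + 1, coordinates.2)
      else if item = 'l' then (coordinates.1 - 1, coordinates.2)
      else coordinates)
    (0, 0)

-- ===== PORT B =====
def follow_H_alt (instructions : String) : Int × Int :=
  ((PySem.Str.count instructions "r" : Int) - (PySem.Str.count instructions "l" : Int),
   (PySem.Str.count instructions "f" : Int) - (PySem.Str.count instructions "b" : Int))

-- ===== PRECONDITION & SPEC =====
def Spec_follow_H (instructions : String) (out : Int × Int) : Prop := out = follow_H_alt instructions
instance (instructions : String) (out : Int × Int) : Decidable (Spec_follow_H instructions out) := by unfold Spec_follow_H; infer_instance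

-- ===== CLAIM (what is proved, stated in full; the proofs are below) =====
def Claim_equal_follow_H : Prop := ∀ (instructions : String), Dom_follow_H instructions → Spec_follow_H instructions (follow_H instructions)

-- ===== LEMMAS AND PROOFS =====

-- Python's str.count with a single-character needle is List.count of that character.
theorem chars_count_go_single (c : Char) : ∀ (l : List Char) (fuel acc : Nat),
    l.length ≤ fuel → PySem.Chars.count.go [c] fuel l acc = acc + l.count c := by
  intro l
  induction l with
  | nil => intro fuel acc _; cases fuel <;> simp [PySem.Chars.count.go]
  | cons h t ih =>
    intro fuel acc hle
    cases fuel with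
    | zero => simp at hle
    | succ n =>
      simp only [List.length_cons, Nat.succ_le_succ_iff] at hle
      by_cases hc : c = h
      · subst hc
        simp [PySem.Chars.count.go, List.isPrefixOf, ih n (acc + 1) hle]
        omega
      · have hp : ¬ List.isPrefixOf [c] (h :: t) = true := by
          simp [List.isPrefixOf]; intro hch; exact absurd hch hc
        simp [PySem.Chars.count.go, hp, ih n acc hle, Ne.symm hc]

theorem chars_count_single (l : List Char) (c : Char) :
    PySem.Chars.count l [c] = l.count c := by
  simp only [PySem.Chars.count, List.isEmpty]
  exact (chars_count_go_single c l l.length 0 (le_refl _)).trans (Nat.zero_add _)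

theorem foldl_step (l : List Char) : ∀ (x y : Int),
    l.foldl
      (fun coordinates item =>
        if item = 'f' then (coordinates.1, coordinates.2 + 1)
        else if item = 'b' then (coordinates.1, coordinates.2 - 1)
        else if item = 'r' then (coordinates.1 + 1, coordinates.2)
        else if item = 'l' then (coordinates.1 - 1, coordinates.2)
        else coordinates) (x, y)
    = (x + l.count 'r' - l.count 'l', y + l.count 'f' - l.count 'b') := by
  induction l with
  | nil => intro x y; simp
  | cons h t ih =>
    intro x y
    by_cases hf : h = 'f'
    · subst hf; simp [List.foldl, ih]; omega
    · by_cases hb : h = 'b'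
      · subst hb; simp [List.foldl, ih]; omega
      · by_cases hr : h = 'r'
        · subst hr; simp [List.foldl, ih]; omega
        · by_cases hl : h = 'l'
          · subst hl; simp [List.foldl, ih]; omega
          · simp [List.foldl, hf, hb, hr, hl, ih]

-- ===== VERDICT (by name: the statement is the Claim_ definition above) =====
theorem follow_H_spec : Claim_equal_follow_H := by
  intro s _
  show follow_H s = follow_H_alt s
  unfold follow_H follow_H_alt
  rw [foldl_step]
  rw [PySem.Str.count_eq s "r", PySem.Str.count_eq s "l",
      PySem.Str.count_eq s "f", PySem.Str.count_eq s "b"]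
  rw [show ("r" : String).toList = ['r'] from rfl, show ("l" : String).toList = ['l'] from rfl,
      show ("f" : String).toList = ['f'] from rfl, show ("b" : String).toList = ['b'] from rfl]
  rw [chars_count_single, chars_count_single, chars_count_single, chars_count_single]
  simp
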